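-- pv_equiv track=rewrite | github.com/jangidyash59/food_recommender | app.py | get_available_prefixes
-- ===== SOURCE A (Python) =====
-- def get_available_prefixes(loaded_rest_keys, all_prefixes):
--     found = set()
--     for key in loaded_rest_keys:
--         for p in all_prefixes:
--             if key.startswith(p):
--                 found.add(p)
--                 break
--     return sorted(list(found))
-- ===== SOURCE B (Python) =====
-- def get_available_prefixes(loaded_rest_keys, all_prefixes):
--     # Prefix-major pass: for each prefix in order, claim every still-unmatched
--     # key it starts; a key claimed by an earlier prefix can never be matched
--     # by a later one, which is exactly A's inner-loop "break" semantics.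
--     remaining = list(loaded_rest_keys)
--     found = []
--     for p in all_prefixes:
--         still = [k for k in remaining if not k.startswith(p)]
--         if len(still) != len(remaining):
--             found.append(p)
--             remaining = still
--     return sorted(found)
-- ===== Notes on version B (the rewrite author's own statement) =====
-- stated objective: alternative
-- what changed: A scans prefixes anew for every key (key-major with an inner break); B makes one prefix-major pass that claims all still-unmatched keys per prefix out of a shrinking remaining list, then sorts the found prefixes.
import Mathlib
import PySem

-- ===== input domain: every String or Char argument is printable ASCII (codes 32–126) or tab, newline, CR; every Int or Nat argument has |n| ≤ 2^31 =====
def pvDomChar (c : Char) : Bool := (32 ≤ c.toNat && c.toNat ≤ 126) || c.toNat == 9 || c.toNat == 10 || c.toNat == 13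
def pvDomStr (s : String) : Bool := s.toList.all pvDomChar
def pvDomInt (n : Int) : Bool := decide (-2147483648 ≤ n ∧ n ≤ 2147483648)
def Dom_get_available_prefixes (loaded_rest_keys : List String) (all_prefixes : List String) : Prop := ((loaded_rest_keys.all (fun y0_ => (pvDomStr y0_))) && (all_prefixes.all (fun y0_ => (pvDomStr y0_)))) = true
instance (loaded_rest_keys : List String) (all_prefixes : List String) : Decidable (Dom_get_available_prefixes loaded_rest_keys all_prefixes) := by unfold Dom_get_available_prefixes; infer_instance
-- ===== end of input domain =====

-- B replaces A's key-major scan (first matching prefix per key, inner break) by a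
-- prefix-major pass over a shrinking list of unmatched keys; objective: alternative.

-- ===== PORT A =====
-- inner 'for p in all_prefixes: if key.startswith(p): found.add(p); break'
def pvInnerA (key : String) (found : PySem.Set String) : List String → PySem.Set String
  | [] => found
  | p :: rest =>
    if PySem.Str.startswith key p then PySem.Set.add found p
    else pvInnerA key found rest

def get_available_prefixes (loaded_rest_keys : List String) (all_prefixes : List String) : List String :=
  let found := loaded_rest_keys.foldl (fun found key => pvInnerA key found all_prefixes) PySem.Set.empty
  PySem.List.sorted found (fun x => x) false

-- ===== PORT B =====
def pvLoopB (remaining : List String) (found : List String) : List String → List String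
  | [] => found
  | p :: ps =>
    let still := remaining.filter (fun k => !(PySem.Str.startswith k p))
    if still.length ≠ remaining.length then pvLoopB still (found ++ [p]) ps
    else pvLoopB remaining found ps

def get_available_prefixes_alt (loaded_rest_keys : List String) (all_prefixes : List String) : List String :=
  PySem.List.sorted (pvLoopB loaded_rest_keys [] all_prefixes) (fun x => x) false

-- ===== PRECONDITION & SPEC =====
def Spec_get_available_prefixes (loaded_rest_keys : List String) (all_prefixes : List String) (out : List String) : Prop := out = get_available_prefixes_alt loaded_rest_keys all_prefixes
instance (loaded_rest_keys : List String) (all_prefixes : List String) (out : List String) : Decidable (Spec_get_available_prefixes loaded_rest_keys all_prefixes out) := by unfold Spec_get_available_prefixes; infer_instance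

-- ===== CLAIM (what is proved, stated in full; the proofs are below) =====
def Claim_equal_get_available_prefixes : Prop := ∀ (loaded_rest_keys : List String) (all_prefixes : List String), Dom_get_available_prefixes loaded_rest_keys all_prefixes → Spec_get_available_prefixes loaded_rest_keys all_prefixes (get_available_prefixes loaded_rest_keys all_prefixes)

-- ===== LEMMAS AND PROOFS =====

-- first matching prefix of a key, the value A's inner loop adds
def pvFirst (ps : List String) (k : String) : Option String :=
  ps.find? (fun p => PySem.Str.startswith k p)

theorem pvInnerA_eq (key : String) (found : PySem.Set String) (ps : List String) :
    pvInnerA key found ps =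
      match pvFirst ps key with
      | some p => PySem.Set.add found p
      | none => found := by
  induction ps with
  | nil => rfl
  | cons p rest ih =>
    by_cases h : PySem.Str.startswith key p = true
    · simp [pvInnerA, pvFirst, PySem.Str.startswith] at h ⊢
      simp [h]
    · simp [pvInnerA, pvFirst, PySem.Str.startswith, List.find?] at h ⊢
      simp [h, ih, pvFirst]

-- membership in A's accumulated set
theorem pvFoldA_mem (keys : List String) (ps : List String) (s : PySem.Set String) (q : String) :
    q ∈ keys.foldl (fun found key => pvInnerA key found ps) s ↔
      q ∈ s ∨ ∃ k ∈ keys, pvFirst ps k = some q := by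
  induction keys generalizing s with
  | nil => simp
  | cons k rest ih =>
    rw [List.foldl_cons, pvInnerA_eq]
    cases h : pvFirst ps k with
    | none =>
      rw [ih]
      constructor
      · rintro (hq | hq)
        · exact Or.inl hq
        · exact Or.inr (by obtain ⟨k', hk', h'⟩ := hq; exact ⟨k', by simp [hk'], h'⟩)
      · rintro (hq | ⟨k', hk', h'⟩)
        · exact Or.inl hq
        · rcases List.mem_cons.mp hk' with rfl | hk'
          · simp [h] at h'
          · exact Or.inr ⟨k', hk', h'⟩
    | some p =>
      rw [ih]
      simp only [PySem.Set.mem_add]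
      constructor
      · rintro ((hq | rfl) | ⟨k', hk', h'⟩)
        · exact Or.inl hq
        · exact Or.inr ⟨k, List.mem_cons_self, h⟩
        · exact Or.inr ⟨k', List.mem_cons_of_mem _ hk', h'⟩
      · rintro (hq | ⟨k', hk', h'⟩)
        · exact Or.inl (Or.inl hq)
        · rcases List.mem_cons.mp hk' with rfl | hk'
          · rw [h] at h'
            exact Or.inl (Or.inr (Option.some.inj h').symm)
          · exact Or.inr ⟨k', hk', h'⟩

-- A's set is Nodup (it is a PySem.Set)
theorem pvFoldA_nodup (keys : List String) (ps : List String) (s : PySem.Set String)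
    (hs : s.Nodup) :
    (keys.foldl (fun found key => pvInnerA key found ps) s).Nodup := by
  induction keys generalizing s with
  | nil => exact hs
  | cons k rest ih =>
    simp only [List.foldl_cons]
    apply ih
    rw [pvInnerA_eq]
    cases pvFirst ps k with
    | none => exact hs
    | some p => exact PySem.Set.nodup_add s p hs

-- the step case of pvFirst
theorem pvFirst_cons (p : String) (ps : List String) (k : String) :
    pvFirst (p :: ps) k =
      if PySem.Str.startswith k p then some p else pvFirst ps k := by
  simp only [pvFirst, List.find?]
  by_cases h : PySem.Str.startswith k p = true <;> simp [PySem.Str.startswith] at h <;> simp [h, PySem.Str.startswith]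

-- the branch test of pvLoopB: some remaining key starts with p
theorem pvStill_length_ne (remaining : List String) (p : String) :
    ((remaining.filter (fun k => !(PySem.Str.startswith k p))).length ≠ remaining.length) ↔
      ∃ k ∈ remaining, PySem.Str.startswith k p = true := by
  rw [ne_eq, List.length_filter_eq_length_iff]
  push Not
  constructor
  · rintro ⟨k, hk, h⟩; exact ⟨k, hk, by simpa using h⟩
  · rintro ⟨k, hk, h⟩; exact ⟨k, hk, by simpa [PySem.Str.startswith] using h⟩

-- membership in B's found list
theorem pvLoopB_mem (ps : List String) (remaining found : List String) (q : String) :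
    q ∈ pvLoopB remaining found ps ↔
      q ∈ found ∨ ∃ k ∈ remaining, pvFirst ps k = some q := by
  induction ps generalizing remaining found with
  | nil => simp [pvLoopB, pvFirst]
  | cons p ps ih =>
    simp only [pvLoopB]
    by_cases hb : (remaining.filter (fun k => !(PySem.Str.startswith k p))).length ≠ remaining.length
    · rw [if_pos hb, ih]
      obtain ⟨k0, hk0, hs0⟩ := (pvStill_length_ne remaining p).mp hb
      constructor
      · rintro (hq | ⟨k, hk, h⟩)
        · rcases List.mem_append.mp hq with hq | hq
          · exact Or.inl hq
          · refine Or.inr ⟨k0, hk0, ?_⟩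
            rw [pvFirst_cons, if_pos hs0]
            simpa using (List.mem_singleton.mp hq).symm ▸ rfl
        · rcases List.mem_filter.mp hk with ⟨hkr, hknp⟩
          refine Or.inr ⟨k, hkr, ?_⟩
          rw [pvFirst_cons, if_neg (by simpa using hknp), h]
      · rintro (hq | ⟨k, hk, h⟩)
        · exact Or.inl (List.mem_append.mpr (Or.inl hq))
        · rw [pvFirst_cons] at h
          by_cases hs : PySem.Str.startswith k p = true
          · rw [if_pos hs] at h
            exact Or.inl (List.mem_append.mpr (Or.inr (by simpa using (Option.some.inj h).symm)))
          · rw [if_neg hs] at h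
            exact Or.inr ⟨k, List.mem_filter.mpr ⟨hk, by simpa using hs⟩, h⟩
    · rw [if_neg hb, ih]
      have hall : ∀ k ∈ remaining, ¬ PySem.Str.startswith k p = true := by
        intro k hk hs
        exact hb ((pvStill_length_ne remaining p).mpr ⟨k, hk, hs⟩) |>.elim
      constructor
      · rintro (hq | ⟨k, hk, h⟩)
        · exact Or.inl hq
        · exact Or.inr ⟨k, hk, by rw [pvFirst_cons, if_neg (hall k hk)] at *; exact h⟩
      · rintro (hq | ⟨k, hk, h⟩)
        · exact Or.inl hq
        · rw [pvFirst_cons, if_neg (hall k hk)] at h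
          exact Or.inr ⟨k, hk, h⟩

-- B's found list is Nodup
theorem pvLoopB_nodup (ps : List String) (remaining found : List String)
    (hf : found.Nodup)
    (hsep : ∀ q ∈ found, ∀ k ∈ remaining, ¬ PySem.Str.startswith k q = true) :
    (pvLoopB remaining found ps).Nodup := by
  induction ps generalizing remaining found with
  | nil => exact hf
  | cons p ps ih =>
    simp only [pvLoopB]
    by_cases hb : (remaining.filter (fun k => !(PySem.Str.startswith k p))).length ≠ remaining.length
    · rw [if_pos hb]
      obtain ⟨k0, hk0, hs0⟩ := (pvStill_length_ne remaining p).mp hb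
      have hpnf : p ∉ found := fun hp => hsep p hp k0 hk0 hs0
      apply ih
      · simp only [List.nodup_append, List.nodup_singleton]
        exact ⟨hf, by simpa using fun a ha (hap : a = p) => hpnf (hap ▸ ha)⟩
      · intro q hq k hk
        rcases List.mem_filter.mp hk with ⟨hkr, hknp⟩
        rcases List.mem_append.mp hq with hq | hq
        · exact hsep q hq k hkr
        · rw [List.mem_singleton.mp hq]
          simpa using hknp
    · rw [if_neg hb]
      exact ih remaining found hf hsep

-- ===== VERDICT (by name: the statement is the Claim_ definition above) =====
theorem get_available_prefixes_spec : Claim_equal_get_available_prefixes := by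
  intro keys ps _
  unfold Spec_get_available_prefixes get_available_prefixes get_available_prefixes_alt
  apply (PySem.List.sorted_id_eq_sorted_id_iff_perm _ _).mpr
  apply (List.perm_ext_iff_of_nodup ?_ ?_).mpr
  · intro q
    rw [pvFoldA_mem, pvLoopB_mem]
    simp [PySem.Set.empty]
  · exact pvFoldA_nodup keys ps PySem.Set.empty List.nodup_nil
  · exact pvLoopB_nodup ps keys [] List.nodup_nil (by simp)
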